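-- pv_equiv track=rewrite | github.com/nhdewitt/codewars-kata | Python/7 kyu/method_for_counting_total_occurence_of_specific_digits.py | count_spec_digits
-- ===== SOURCE A (Python) =====
-- def count_spec_digits(integers_list, digits_list):
--     d = []                                                      # create initial list to hold integers
--     for i in integers_list:
--         d.extend(list(map(int, str(abs(i)))))                   # abs(i) to ignore -, map each integers individual digits back to an int and extend d
--     digit_freq = {k: 0 for k in digits_list}                    # only care about freq of digits in digits_list
--     for i in d:
--         if i in digit_freq.keys():
--             digit_freq[i] += 1                                  # count digits
--     return list((k, digit_freq[k]) for k in digits_list)        # return list of tuples in order of digits_list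
-- ===== SOURCE B (Python) =====
-- def count_spec_digits(integers_list, digits_list):
--     result = []
--     for d in digits_list:
--         total = 0
--         for i in integers_list:
--             for ch in str(abs(i)):
--                 if int(ch) == d:
--                     total += 1
--         result.append((d, total))
--     return result
-- ===== Notes on version B (the rewrite author's own statement) =====
-- stated objective: alternative
-- what changed: B drops A's flattened digit list and frequency dict entirely: for each requested digit it scans the integers' digit strings directly and sums the matches, emitting (d, count) in digits_list order.
import Mathlib
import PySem

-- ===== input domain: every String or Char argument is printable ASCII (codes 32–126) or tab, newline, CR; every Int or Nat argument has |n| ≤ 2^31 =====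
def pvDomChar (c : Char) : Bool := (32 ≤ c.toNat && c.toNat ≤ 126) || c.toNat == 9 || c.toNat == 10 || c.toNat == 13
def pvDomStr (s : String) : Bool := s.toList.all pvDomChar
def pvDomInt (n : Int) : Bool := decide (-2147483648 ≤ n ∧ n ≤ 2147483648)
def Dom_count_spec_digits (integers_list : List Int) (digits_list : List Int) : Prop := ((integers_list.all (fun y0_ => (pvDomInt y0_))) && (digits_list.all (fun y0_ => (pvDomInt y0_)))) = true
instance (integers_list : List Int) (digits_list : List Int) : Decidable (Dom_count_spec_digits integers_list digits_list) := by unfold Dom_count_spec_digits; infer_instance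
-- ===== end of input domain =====

-- B replaces A's flattened digit list + frequency dict by a direct per-requested-digit scan of the
-- integers' digit strings (alternative decomposition; return value identical).

-- int(ch) for a decimal digit character ch (exact: str(abs(i)) yields only '0'..'9')
def pvCharInt (c : Char) : Int := (c.toNat : Int) - 48

-- ===== PORT A =====
def count_spec_digits (integers_list : List Int) (digits_list : List Int) : List (Int × Int) :=
  let d := integers_list.foldl (fun acc i => acc ++ (PySem.Int.toChars |i|).map pvCharInt) []
  let df0 := digits_list.foldl (fun df k => df.insert k (0 : Int)) PySem.Dict.empty
  let df := d.foldl (fun df i => if df.contains i then df.modify i 0 (· + 1) else df) df0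
  digits_list.map (fun k => (k, df.getD k 0))

-- ===== PORT B =====
def count_spec_digits_alt (integers_list : List Int) (digits_list : List Int) : List (Int × Int) :=
  digits_list.map (fun dgt =>
    (dgt, integers_list.foldl (fun acc i =>
      (PySem.Int.toChars |i|).foldl (fun t ch => if pvCharInt ch == dgt then t + 1 else t) acc) 0))

-- ===== PRECONDITION & SPEC =====
def Spec_count_spec_digits (integers_list : List Int) (digits_list : List Int) (out : List (Int × Int)) : Prop := out = count_spec_digits_alt integers_list digits_list
instance (integers_list : List Int) (digits_list : List Int) (out : List (Int × Int)) : Decidable (Spec_count_spec_digits integers_list digits_list out) := by unfold Spec_count_spec_digits; infer_instance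

-- ===== CLAIM (what is proved, stated in full; the proofs are below) =====
def Claim_equal_count_spec_digits : Prop := ∀ (integers_list : List Int) (digits_list : List Int), Dom_count_spec_digits integers_list digits_list → Spec_count_spec_digits integers_list digits_list (count_spec_digits integers_list digits_list)

-- ===== LEMMAS AND PROOFS =====

-- the init dict comprehension {k: 0 for k in dl}: contains k iff inserted or already present
theorem pv_init_contains (dl : List Int) (k : Int) (df : PySem.Dict Int Int) :
    (dl.foldl (fun df k => df.insert k (0 : Int)) df).contains k
      = (decide (k ∈ dl) || df.contains k) := by
  induction dl generalizing df with
  | nil => simp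
  | cons a t ih =>
    simp only [List.foldl_cons, ih, PySem.Dict.contains_insert, List.mem_cons]
    by_cases h : k = a <;> by_cases h2 : k ∈ t <;> simp [h, h2, beq_iff_eq]

theorem pv_init_getD (dl : List Int) (k : Int) (df : PySem.Dict Int Int) :
    (dl.foldl (fun df k => df.insert k (0 : Int)) df).getD k 0
      = if k ∈ dl then 0 else df.getD k 0 := by
  induction dl generalizing df with
  | nil => simp
  | cons a t ih =>
    simp only [List.foldl_cons, ih, PySem.Dict.getD_insert, List.mem_cons]
    by_cases h1 : k ∈ t <;> by_cases h2 : k = a <;> simp [h1, h2]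

-- A's counting loop: conditional increment adds d.count k to a contained key k
theorem pv_count_loop (d : List Int) (k : Int) (df : PySem.Dict Int Int) (hc : df.contains k = true) :
    (d.foldl (fun df i => if df.contains i then df.modify i 0 (· + 1) else df) df).getD k 0
      = df.getD k 0 + d.count k := by
  induction d generalizing df with
  | nil => simp
  | cons x t ih =>
    simp only [List.foldl_cons]
    by_cases hx : df.contains x = true
    · rw [if_pos hx, ih _ (by simp [PySem.Dict.contains_modify, hc]),
        PySem.Dict.getD_modify]
      by_cases hkx : k = x
      · subst hkx; simp; ring
      · simp [hkx, Ne.symm hkx]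
    · rw [if_neg hx, ih _ hc]
      have hkx : k ≠ x := fun e => hx (e ▸ hc)
      simp [Ne.symm hkx]

-- count of a flat-concatenation fold = per-element counts summed
theorem pv_count_flat (il : List Int) (k : Int) (f : Int → List Int) (init : List Int) :
    ((il.foldl (fun acc i => acc ++ f i) init).count k : Int)
      = (init.count k : Int) + (il.map (fun i => ((f i).count k : Int))).sum := by
  induction il generalizing init with
  | nil => simp
  | cons a t ih =>
    simp only [List.foldl_cons, List.map_cons, List.sum_cons, ih, List.count_append]
    push_cast; ring

-- ===== VERDICT (by name: the statement is the Claim_ definition above) =====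
theorem count_spec_digits_spec : Claim_equal_count_spec_digits := by
  intro il dl _
  show _ = _
  unfold count_spec_digits count_spec_digits_alt
  apply List.map_congr_left
  intro k hk
  refine Prod.ext rfl ?_
  simp only
  rw [pv_count_loop _ _ _ (by rw [pv_init_contains]; simp [hk]),
    pv_init_getD]
  simp only [hk, if_pos, zero_add]
  rw [pv_count_flat]
  simp only [List.count_nil, Nat.cast_zero, zero_add]
  have hB : ∀ (acc i : Int),
      (PySem.Int.toChars |i|).foldl (fun t ch => if pvCharInt ch == k then t + 1 else t) acc
        = acc + (((PySem.Int.toChars |i|).countP (fun ch => pvCharInt ch == k) : Nat) : Int) := by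
    intro acc i
    exact PySem.List.foldl_if_add_one _ _ _
  rw [show (fun (acc i : Int) =>
      (PySem.Int.toChars |i|).foldl (fun t ch => if pvCharInt ch == k then t + 1 else t) acc)
      = fun acc i => acc + (((PySem.Int.toChars |i|).countP (fun ch => pvCharInt ch == k) : Nat) : Int)
      from funext fun acc => funext fun i => hB acc i,
    PySem.List.foldl_add]
  simp only [zero_add]
  exact congrArg List.sum (List.map_congr_left fun i _ => by
    simp [List.count_eq_countP, List.countP_map, Function.comp_def])
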